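-- pv_equiv track=rewrite | github.com/dice-group/literal-embeddings | Literal_EA/main.py | build_er_vocab
-- ===== SOURCE A (Python) =====
-- def build_er_vocab(triples, entity2idx, relation2idx):
--     """Build entity-relation vocabulary for filtered evaluation"""
--     er_vocab = dict()
--     for h, r, t in triples:
--         h_idx = entity2idx[h]
--         r_idx = relation2idx[r]
--         t_idx = entity2idx[t]
--         er_vocab.setdefault((h_idx, r_idx), []).append(t_idx)
--     return er_vocab
-- ===== SOURCE B (Python) =====
-- def build_er_vocab(triples, entity2idx, relation2idx):
--     """Build entity-relation vocabulary for filtered evaluation"""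
--     pairs = [((entity2idx[h], relation2idx[r]), entity2idx[t])
--              for h, r, t in triples]
--     keys = dict.fromkeys(k for k, _ in pairs)
--     return {k: [t for k2, t in pairs if k2 == k] for k in keys}
-- ===== Notes on version B (the rewrite author's own statement) =====
-- stated objective: alternative
-- what changed: Replaces the one-pass setdefault/append hash aggregation with a three-stage pipeline: map triples to (key, tail) pairs, ordered-dedup the keys with dict.fromkeys, then build each group's tail list by a per-key filtering comprehension.
import Mathlib
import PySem

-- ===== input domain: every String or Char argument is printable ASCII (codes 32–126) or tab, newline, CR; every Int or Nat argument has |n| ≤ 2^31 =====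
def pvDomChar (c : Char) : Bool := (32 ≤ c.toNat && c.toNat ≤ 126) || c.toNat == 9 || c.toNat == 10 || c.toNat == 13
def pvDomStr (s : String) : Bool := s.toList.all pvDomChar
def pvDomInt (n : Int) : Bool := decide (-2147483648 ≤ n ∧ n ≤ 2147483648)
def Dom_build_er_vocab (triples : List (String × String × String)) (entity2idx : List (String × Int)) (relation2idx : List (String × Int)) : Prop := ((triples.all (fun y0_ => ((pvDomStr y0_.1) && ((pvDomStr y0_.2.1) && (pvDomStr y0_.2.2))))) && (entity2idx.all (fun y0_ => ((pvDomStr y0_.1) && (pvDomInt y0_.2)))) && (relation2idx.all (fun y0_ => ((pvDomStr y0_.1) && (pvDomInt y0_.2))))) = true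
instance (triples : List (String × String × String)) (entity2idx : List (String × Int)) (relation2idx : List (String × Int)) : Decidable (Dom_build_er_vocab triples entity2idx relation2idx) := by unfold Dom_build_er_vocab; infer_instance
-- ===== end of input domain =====

-- ===== PORT A =====
-- B builds the vocabulary as map-to-pairs / ordered key dedup / per-key filter instead of
-- A's one-pass setdefault aggregation (alternative decomposition, same results).
-- A: dict with setdefault(...).append(...) over the triples; setdefault+append is Dict.modify k [] (· ++ [t]).
def build_er_vocab (triples : List (String × String × String)) (entity2idx : List (String × Int)) (relation2idx : List (String × Int)) : List (Int × Int × List Int) :=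
  let er_vocab : PySem.Dict (Int × Int) (List Int) :=
    triples.foldl (fun er_vocab hrt =>
      let h_idx : Int := (PySem.Dict.mk entity2idx).getD hrt.1 0      -- Pre_ excludes KeyError
      let r_idx : Int := (PySem.Dict.mk relation2idx).getD hrt.2.1 0  -- Pre_ excludes KeyError
      let t_idx : Int := (PySem.Dict.mk entity2idx).getD hrt.2.2 0    -- Pre_ excludes KeyError
      er_vocab.modify (h_idx, r_idx) [] (· ++ [t_idx])) PySem.Dict.empty
  er_vocab.items.map (fun p => (p.1.1, p.1.2, p.2))

-- ===== PORT B =====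
def build_er_vocab_alt (triples : List (String × String × String)) (entity2idx : List (String × Int)) (relation2idx : List (String × Int)) : List (Int × Int × List Int) :=
  let pairs : List ((Int × Int) × Int) :=
    triples.map (fun hrt =>
      (((PySem.Dict.mk entity2idx).getD hrt.1 0, (PySem.Dict.mk relation2idx).getD hrt.2.1 0),
       (PySem.Dict.mk entity2idx).getD hrt.2.2 0))
  let keys := PySem.List.dedup (pairs.map (fun p => p.1))   -- dict.fromkeys(k for k, _ in pairs)
  keys.map (fun k => (k.1, k.2, (pairs.filter (fun p => p.1 == k)).map (fun p => p.2)))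

-- ===== PRECONDITION & SPEC =====
-- Pre_ excludes exactly the inputs where A raises KeyError: some looked-up head/relation/tail is missing.
def Pre_build_er_vocab (triples : List (String × String × String)) (entity2idx : List (String × Int)) (relation2idx : List (String × Int)) : Prop :=
  ∀ hrt ∈ triples, (PySem.Dict.mk entity2idx).contains hrt.1 = true ∧
    (PySem.Dict.mk relation2idx).contains hrt.2.1 = true ∧
    (PySem.Dict.mk entity2idx).contains hrt.2.2 = true
instance (triples : List (String × String × String)) (entity2idx : List (String × Int)) (relation2idx : List (String × Int)) : Decidable (Pre_build_er_vocab triples entity2idx relation2idx) := by unfold Pre_build_er_vocab; infer_instance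
def pvWitness_build_er_vocab : (List (String × String × String)) × (List (String × Int)) × (List (String × Int)) :=
  ([("a", "r", "b"), ("a", "r", "a")], [("a", 0), ("b", 1)], [("r", 7)])
def Spec_build_er_vocab (triples : List (String × String × String)) (entity2idx : List (String × Int)) (relation2idx : List (String × Int)) (out : List (Int × Int × List Int)) : Prop := out = build_er_vocab_alt triples entity2idx relation2idx
instance (triples : List (String × String × String)) (entity2idx : List (String × Int)) (relation2idx : List (String × Int)) (out : List (Int × Int × List Int)) : Decidable (Spec_build_er_vocab triples entity2idx relation2idx out) := by unfold Spec_build_er_vocab; infer_instance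

-- ===== CLAIM (what is proved, stated in full; the proofs are below) =====
def Claim_equal_build_er_vocab : Prop := ∀ (triples : List (String × String × String)) (entity2idx : List (String × Int)) (relation2idx : List (String × Int)), Dom_build_er_vocab triples entity2idx relation2idx → Pre_build_er_vocab triples entity2idx relation2idx → Spec_build_er_vocab triples entity2idx relation2idx (build_er_vocab triples entity2idx relation2idx)

-- ===== LEMMAS AND PROOFS =====
-- A's setdefault/append loop over (key, tail) pairs yields, as an items list, exactly:
-- the keys in first-occurrence order, each with the tails of its matching pairs in order.
theorem group_items_aux (ps : List ((Int × Int) × Int)) :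
    (ps.foldl (fun d p => d.modify p.1 ([] : List Int) (fun v => v ++ [p.2])) PySem.Dict.empty).items
      = (PySem.List.dedup (ps.map (fun p => p.1))).map
          (fun k => (k, (ps.filter (fun p => p.1 == k)).map (fun p => p.2))) := by
  have hnd := PySem.Dict.nodup_keys_foldl_modify_key ps (fun p => p.1) ([] : List Int)
      (fun _ p => fun v => v ++ [p.2]) PySem.Dict.empty (by simp)
  rw [PySem.Dict.items_eq_map_keys _ hnd ([] : List Int),
      PySem.Dict.keys_foldl_modify_key ps (fun p => p.1) ([] : List Int)
        (fun _ p => fun v => v ++ [p.2]) PySem.Dict.empty]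
  rw [show PySem.Dict.empty.keys = ([] : List (Int × Int)) from rfl, PySem.Set.update_nil_left,
      PySem.List.dedup_eq_ofList]
  refine List.map_congr_left fun k _ => ?_
  rw [PySem.Dict.getD_foldl_modify_append ps PySem.Dict.empty k]
  simp [PySem.Dict.getD_empty]

theorem build_er_vocab_eq_alt (triples : List (String × String × String)) (entity2idx : List (String × Int)) (relation2idx : List (String × Int)) :
    build_er_vocab triples entity2idx relation2idx = build_er_vocab_alt triples entity2idx relation2idx := by
  unfold build_er_vocab build_er_vocab_alt
  rw [← List.foldl_map (f := fun hrt : String × String × String =>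
        (((PySem.Dict.mk entity2idx).getD hrt.1 0, (PySem.Dict.mk relation2idx).getD hrt.2.1 0),
         (PySem.Dict.mk entity2idx).getD hrt.2.2 0))
      (g := fun (d : PySem.Dict (Int × Int) (List Int)) (p : (Int × Int) × Int) =>
         d.modify p.1 ([] : List Int) (fun v => v ++ [p.2]))]
  simp only [group_items_aux, List.map_map]
  rfl

-- ===== VERDICT (by name: the statement is the Claim_ definition above) =====
theorem build_er_vocab_spec : Claim_equal_build_er_vocab := by
  intro triples e2i r2i _ _
  unfold Spec_build_er_vocab
  exact build_er_vocab_eq_alt triples e2i r2i
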